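-- pv_equiv track=rewrite | github.com/TotallyReal/continued_fractions | zaremba.py | cf_length
-- ===== SOURCE A (Python) =====
-- def cf_length(numerator: int, denominator: int) -> int:
--     numerator = abs(numerator)
--     denominator = abs(denominator)
--     counter = 0
--     while numerator > 0:
--         numerator, denominator = denominator % numerator, numerator
--         counter += 1
--     if denominator == 1:
--         return counter
--     return -1
-- ===== SOURCE B (Python) =====
-- def cf_length(numerator: int, denominator: int) -> int:
--     def rec(n, d):
--         if n == 0:
--             return (0, d)
--         c, g = rec(d % n, n)
--         return (c + 1, g)
--     count, gcd = rec(abs(numerator), abs(denominator))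
--     return count if gcd == 1 else -1
-- ===== Notes on version B (the rewrite author's own statement) =====
-- stated objective: alternative
-- what changed: Replaced the imperative while-loop with a counter accumulator by a pair-returning recursive Euclid helper that returns (expansion length, gcd) and decides at the top.
import Mathlib
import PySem

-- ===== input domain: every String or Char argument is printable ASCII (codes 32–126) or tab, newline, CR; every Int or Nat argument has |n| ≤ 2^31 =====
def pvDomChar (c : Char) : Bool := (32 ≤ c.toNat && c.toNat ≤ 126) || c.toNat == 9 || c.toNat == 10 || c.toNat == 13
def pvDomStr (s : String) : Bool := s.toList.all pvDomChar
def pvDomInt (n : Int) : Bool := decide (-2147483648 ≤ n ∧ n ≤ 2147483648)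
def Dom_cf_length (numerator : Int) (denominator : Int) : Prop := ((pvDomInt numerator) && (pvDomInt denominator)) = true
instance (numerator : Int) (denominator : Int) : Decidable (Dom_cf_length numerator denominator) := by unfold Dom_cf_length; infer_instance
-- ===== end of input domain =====

-- B replaces A's while-loop with a counter by a pair-returning recursive Euclid helper; same cost (objective: alternative).
-- ===== PORT A =====
-- the while-loop of A: state (numerator, denominator, counter); after the loop, the d == 1 test
def cfLoopA (n d counter : Int) : Int :=
  if h : n > 0 then
    cfLoopA (PySem.Int.mod d n) n (counter + 1)
  else if d = 1 then counter else -1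
termination_by n.toNat
decreasing_by
  have h2 := PySem.Int.mod_lt d h
  omega

def cf_length (numerator : Int) (denominator : Int) : Int :=
  cfLoopA |numerator| |denominator| 0

-- ===== PORT B =====
-- rec(n, d) = (length of the continued-fraction expansion, gcd)
def cfRec (n d : Int) : Int × Int :=
  if h : n = 0 then (0, d)
  else
    let p := cfRec (PySem.Int.mod d n) n
    (p.1 + 1, p.2)
termination_by n.natAbs
decreasing_by
  rcases lt_or_gt_of_ne h with hn | hp
  · have := PySem.Int.mod_neg_bounds d hn
    omega
  · have h1 := PySem.Int.mod_nonneg d hp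
    have h2 := PySem.Int.mod_lt d hp
    omega

def cf_length_alt (numerator : Int) (denominator : Int) : Int :=
  let p := cfRec |numerator| |denominator|
  if p.2 = 1 then p.1 else -1

-- ===== PRECONDITION & SPEC =====
def Spec_cf_length (numerator : Int) (denominator : Int) (out : Int) : Prop := out = cf_length_alt numerator denominator
instance (numerator : Int) (denominator : Int) (out : Int) : Decidable (Spec_cf_length numerator denominator out) := by unfold Spec_cf_length; infer_instance

-- ===== CLAIM (what is proved, stated in full; the proofs are below) =====
def Claim_equal_cf_length : Prop := ∀ (numerator : Int) (denominator : Int), Dom_cf_length numerator denominator → Spec_cf_length numerator denominator (cf_length numerator denominator)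

-- ===== LEMMAS AND PROOFS =====
theorem cfLoopA_eq_cfRec (n d c : Int) (hn : 0 ≤ n) :
    cfLoopA n d c = (if (cfRec n d).2 = 1 then (cfRec n d).1 + c else -1) := by
  by_cases h : n > 0
  · have h1 := PySem.Int.mod_nonneg d h
    rw [cfLoopA, dif_pos h, cfRec, dif_neg (by omega : ¬ n = 0)]
    rw [cfLoopA_eq_cfRec (PySem.Int.mod d n) n (c + 1) h1]
    split_ifs <;> (simp; try ring)
  · have hz : n = 0 := by omega
    subst hz
    rw [cfLoopA, cfRec]
    simp
termination_by n.toNat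
decreasing_by
  have h2 := PySem.Int.mod_lt d h
  omega

-- ===== VERDICT (by name: the statement is the Claim_ definition above) =====
theorem cf_length_spec : Claim_equal_cf_length := by
  intro numerator denominator _
  unfold Spec_cf_length cf_length cf_length_alt
  rw [cfLoopA_eq_cfRec _ _ _ (abs_nonneg numerator)]
  simp
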